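-- pv_equiv track=rewrite | github.com/Pancio-code/Fondamenti-informatica-I | laboratorio/esercizi funzioni/Lab07/A_Ex4.py | A_Ex4
-- ===== SOURCE A (Python) =====
-- def A_Ex4(l):
--     s=[]
--     for i in l:
--         for f in range(len(l)):
--             if len(i)==len(l[f]) and i!=l[f]:
--                 c=(i,l[f])
--                 s.append(c)
--     return s
-- ===== SOURCE B (Python) =====
-- def A_Ex4(l):
--     buckets = {}
--     for x in l:
--         buckets.setdefault(len(x), []).append(x)
--     out = []
--     for i in l:
--         for x in buckets[len(i)]:
--             if x != i:
--                 out.append((i, x))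
--     return out
-- ===== Notes on version B (the rewrite author's own statement) =====
-- stated objective: faster
-- what changed: B buckets the strings by length in one dict pass and then pairs each element only with its own length group, instead of A's full nested scan over all index pairs.
import Mathlib
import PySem

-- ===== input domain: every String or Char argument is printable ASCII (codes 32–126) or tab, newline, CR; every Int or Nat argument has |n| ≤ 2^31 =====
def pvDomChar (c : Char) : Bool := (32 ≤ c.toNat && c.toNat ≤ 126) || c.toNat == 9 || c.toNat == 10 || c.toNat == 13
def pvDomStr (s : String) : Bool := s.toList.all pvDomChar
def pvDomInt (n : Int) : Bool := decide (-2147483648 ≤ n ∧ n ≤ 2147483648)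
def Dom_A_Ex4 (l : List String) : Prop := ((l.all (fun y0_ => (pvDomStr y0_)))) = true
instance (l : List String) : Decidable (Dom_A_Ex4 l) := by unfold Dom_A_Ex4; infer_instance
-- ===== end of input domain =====

-- B is faster: it buckets the strings by length once and pairs each element only within its length group,
-- instead of A's nested scan over all index pairs.

-- ===== PORT A =====
def A_Ex4 (l : List String) : List (String × String) :=
  l.foldl (fun s i =>
    (PySem.List.pyRange 0 (PySem.List.len l)).foldl (fun s f =>
      let x := PySem.List.pyGetD l f ""
      if PySem.Str.len i == PySem.Str.len x && i != x then s ++ [(i, x)] else s) s) []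

-- ===== PORT B =====
-- buckets.setdefault(len(x), []).append(x)  ==  d[len(x)] = d.get(len(x), []) + [x]
def pvBuckets (l : List String) : PySem.Dict Int (List String) :=
  l.foldl (fun d x => d.modify (PySem.Str.len x) [] (fun b => b ++ [x])) PySem.Dict.empty

def A_Ex4_alt (l : List String) : List (String × String) :=
  let d := pvBuckets l
  l.foldl (fun out i =>
    (d.getD (PySem.Str.len i) []).foldl (fun out x =>
      if x != i then out ++ [(i, x)] else out) out) []

-- ===== PRECONDITION & SPEC =====
def Spec_A_Ex4 (l : List String) (out : List (String × String)) : Prop := out = A_Ex4_alt l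
instance (l : List String) (out : List (String × String)) : Decidable (Spec_A_Ex4 l out) := by unfold Spec_A_Ex4; infer_instance

-- ===== CLAIM (what is proved, stated in full; the proofs are below) =====
def Claim_equal_A_Ex4 : Prop := ∀ (l : List String), Dom_A_Ex4 l → Spec_A_Ex4 l (A_Ex4 l)

-- ===== LEMMAS AND PROOFS =====

-- The bucket for key k holds exactly the strings of length k, in order.
theorem pvBuckets_getD (l : List String) (k : Int) :
    (pvBuckets l).getD k [] = l.filter (fun x => PySem.Str.len x == k) := by
  unfold pvBuckets
  have hmap : l.foldl (fun d x => d.modify (PySem.Str.len x) [] (fun b => b ++ [x]))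
      PySem.Dict.empty
      = (l.map (fun x => (PySem.Str.len x, x))).foldl
          (fun d p => d.modify p.1 [] (fun b => b ++ [p.2])) PySem.Dict.empty := by
    rw [List.foldl_map]
  rw [hmap, PySem.Dict.getD_foldl_modify_append, PySem.Dict.getD_empty]
  simp [List.filter_map, Function.comp_def]

theorem A_eq_flatMap (l : List String) :
    A_Ex4 l = l.flatMap (fun i =>
      (l.filter (fun x => PySem.Str.len i == PySem.Str.len x && i != x)).map (fun x => (i, x))) := by
  unfold A_Ex4
  have hin : ∀ (i : String) (s : List (String × String)),
      (PySem.List.pyRange 0 (PySem.List.len l)).foldl (fun s f =>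
        let x := PySem.List.pyGetD l f ""
        if PySem.Str.len i == PySem.Str.len x && i != x then s ++ [(i, x)] else s) s
      = s ++ (l.filter (fun x => PySem.Str.len i == PySem.Str.len x && i != x)).map
          (fun x => (i, x)) := by
    intro i s
    rw [PySem.List.foldl_pyRange_pyGetD l ""
        (fun s x => if PySem.Str.len i == PySem.Str.len x && i != x then s ++ [(i, x)] else s)
        s (le_refl 0)]
    simp only [Int.toNat_zero, List.drop_zero]
    exact PySem.List.foldl_append_if _ _ _ _
  calc l.foldl (fun s i =>
        (PySem.List.pyRange 0 (PySem.List.len l)).foldl (fun s f =>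
          let x := PySem.List.pyGetD l f ""
          if PySem.Str.len i == PySem.Str.len x && i != x then s ++ [(i, x)] else s) s) []
      = l.foldl (fun s i => s ++ (l.filter
          (fun x => PySem.Str.len i == PySem.Str.len x && i != x)).map (fun x => (i, x))) [] := by
        apply PySem.List.foldl_congr_mem
        intro s i _
        exact hin i s
    _ = _ := by
        rw [PySem.List.foldl_append_eq_flatMap]; simp

theorem B_eq_flatMap (l : List String) :
    A_Ex4_alt l = l.flatMap (fun i =>
      (l.filter (fun x => PySem.Str.len i == PySem.Str.len x && i != x)).map (fun x => (i, x))) := by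
  unfold A_Ex4_alt
  simp only [pvBuckets_getD]
  have hin : ∀ (i : String) (s : List (String × String)),
      ((l.filter (fun x => PySem.Str.len x == PySem.Str.len i)).foldl (fun out x =>
        if x != i then out ++ [(i, x)] else out) s)
      = s ++ (l.filter (fun x => PySem.Str.len i == PySem.Str.len x && i != x)).map
          (fun x => (i, x)) := by
    intro i s
    rw [PySem.List.foldl_append_if (fun x => x != i) (fun x => (i, x)), List.filter_filter]
    congr 1
    congr 1
    apply List.filter_congr
    intro x _
    rw [Bool.and_comm, BEq.comm (a := PySem.Str.len x), bne_comm]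
  calc l.foldl (fun out i =>
        ((l.filter (fun x => PySem.Str.len x == PySem.Str.len i)).foldl (fun out x =>
          if x != i then out ++ [(i, x)] else out) out)) []
      = l.foldl (fun out i => out ++ (l.filter
          (fun x => PySem.Str.len i == PySem.Str.len x && i != x)).map (fun x => (i, x))) [] := by
        apply PySem.List.foldl_congr_mem
        intro s i _
        exact hin i s
    _ = _ := by
        rw [PySem.List.foldl_append_eq_flatMap]; simp

-- ===== VERDICT (by name: the statement is the Claim_ definition above) =====
theorem A_Ex4_spec : Claim_equal_A_Ex4 := by
  intro l _
  unfold Spec_A_Ex4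
  rw [A_eq_flatMap, B_eq_flatMap]
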